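-- pv_equiv track=rewrite | github.com/wangyendt/LeetCode | Biweekly Contests/biweek 68/2117. Abbreviating the Product of a Range/Abbreviating the Product of a Range.py | abbreviateProduct
-- ===== SOURCE A (Python) =====
-- def abbreviateProduct(left: int, right: int) -> str:
--     ans = prefix = suffix = 1
--     trailing = 0
--     flag = False
--     for x in range(left, right + 1):
--         if not flag:
--             ans *= x
--             while ans % 10 == 0: ans //= 10
--             if ans >= 1e10: flag = True
--         prefix *= x
--         suffix *= x
--         while prefix >= 1e12: prefix //= 10
--         while suffix % 10 == 0:
--             trailing += 1
--             suffix //= 10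
--         if suffix >= 1e10: suffix %= 10_000_000_000
--     while prefix >= 100000: prefix //= 10
--     suffix %= 100000
--     if flag: return f"{prefix}...{suffix:>05}e{trailing}"
--     return f"{ans}e{trailing}"
-- ===== SOURCE B (Python) =====
-- def abbreviateProduct(left: int, right: int) -> str:
--     # Phase 1: keep the significant part factored as q * 2^c2 * 5^c5 (q coprime to 10):
--     # pull all factors 2 and 5 out of each term, and reconstruct the zero-stripped
--     # product q * 2**(c2-m) * 5**(c5-m) (m = min(c2, c5)); stop once it reaches 10 digits.
--     q, c2, c5 = 1, 0, 0
--     big = False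
--     for x in range(left, right + 1):
--         while x % 2 == 0:
--             x //= 2
--             c2 += 1
--         while x % 5 == 0:
--             x //= 5
--             c5 += 1
--         q *= x
--         m = min(c2, c5)
--         if q * 2 ** (c2 - m) * 5 ** (c5 - m) >= 10 ** 10:
--             big = True
--             break
--     if not big:
--         m = min(c2, c5)
--         return f"{q * 2 ** (c2 - m) * 5 ** (c5 - m)}e{m}"
--     # Phase 2 (abbreviated case only): 12-digit leading window and capped stripped suffix.
--     prefix = suffix = 1
--     trailing = 0
--     for x in range(left, right + 1):
--         prefix *= x
--         while prefix >= 10 ** 12: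
--             prefix //= 10
--         suffix *= x
--         while suffix % 10 == 0:
--             trailing += 1
--             suffix //= 10
--         if suffix >= 10 ** 10:
--             suffix %= 10 ** 10
--     while prefix >= 10 ** 5:
--         prefix //= 10
--     return f"{prefix}...{suffix % 10 ** 5:05}e{trailing}"
-- ===== Notes on version B (the rewrite author's own statement) =====
-- stated objective: alternative
-- what changed: A maintains a zero-stripped running product via repeated divide-by-10 while-loops and carries ans/prefix/suffix/trailing/flag through one interleaved loop; B instead factors every term as 2^a*5^b*u, keeps the significant part in factored form (q,c2,c5) with q coprime to 10, reconstructs the stripped product in closed form q*2^(c2-m)*5^(c5-m) with m=min(c2,c5) both to detect the 10-digit overflow and to emit the exact short answer (trailing zeros = m, no per-step stripping), and only in the abbreviated case runs a second loop for the 12-digit prefix window and the capped suffix. …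
import Mathlib
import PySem

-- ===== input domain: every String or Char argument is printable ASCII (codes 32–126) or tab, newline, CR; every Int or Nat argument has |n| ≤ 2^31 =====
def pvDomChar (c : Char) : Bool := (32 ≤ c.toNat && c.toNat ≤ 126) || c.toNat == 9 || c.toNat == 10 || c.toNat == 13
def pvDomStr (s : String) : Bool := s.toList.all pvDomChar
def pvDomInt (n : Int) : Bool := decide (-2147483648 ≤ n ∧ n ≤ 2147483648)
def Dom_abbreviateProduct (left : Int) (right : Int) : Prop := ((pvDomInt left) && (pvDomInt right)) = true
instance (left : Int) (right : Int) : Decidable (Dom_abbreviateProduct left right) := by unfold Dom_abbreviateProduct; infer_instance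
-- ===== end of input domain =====

-- B replaces A's repeated divide-by-10 stripping of a running product by a factored
-- representation (all 2s and 5s pulled out of each term) with a closed-form
-- reconstruction of the stripped product; the prefix/suffix loop runs only in the
-- abbreviated case. Same asymptotic cost; alternative algorithm.

-- `while s % 10 == 0: t += 1; s //= 10` — the `s ≠ 0` guard only makes the function
-- total: at s = 0 the Python loop never terminates (excluded by Pre_).
def pvStripCount (s t : Int) : Int × Int :=
  if h : s ≠ 0 ∧ PySem.Int.mod s 10 = 0 then pvStripCount (PySem.Int.floordiv s 10) (t + 1) else (s, t)
termination_by s.natAbs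
decreasing_by
  have hdvd : (10 : Int) ∣ s := (PySem.Int.mod_eq_zero_iff_dvd s 10).1 h.2
  have : PySem.Int.floordiv s 10 = s / 10 := PySem.Int.floordiv_eq_ediv_of_pos (by norm_num)
  rw [this]
  rcases hdvd with ⟨k, hk⟩
  subst hk
  simp only [Int.mul_ediv_cancel_left _ (by norm_num : (10:Int) ≠ 0)]
  have hk0 : k ≠ 0 := by rintro rfl; simp at h
  omega

-- `while n % 10 == 0: n //= 10`  (same totality guard)
def pvStrip10 (n : Int) : Int :=
  if h : n ≠ 0 ∧ PySem.Int.mod n 10 = 0 then pvStrip10 (PySem.Int.floordiv n 10) else n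
termination_by n.natAbs
decreasing_by
  have hdvd : (10 : Int) ∣ n := (PySem.Int.mod_eq_zero_iff_dvd n 10).1 h.2
  have : PySem.Int.floordiv n 10 = n / 10 := PySem.Int.floordiv_eq_ediv_of_pos (by norm_num)
  rw [this]
  rcases hdvd with ⟨k, hk⟩
  subst hk
  simp only [Int.mul_ediv_cancel_left _ (by norm_num : (10:Int) ≠ 0)]
  have hk0 : k ≠ 0 := by rintro rfl; simp at h
  omega

-- `while n >= 10**12: n //= 10`
def pvShrink12 (n : Int) : Int :=
  if _h : n ≥ 1000000000000 then pvShrink12 (PySem.Int.floordiv n 10) else n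
termination_by n.natAbs
decreasing_by
  have : PySem.Int.floordiv n 10 = n / 10 := PySem.Int.floordiv_eq_ediv_of_pos (by norm_num)
  rw [this]
  omega

-- `while n >= 100000: n //= 10`
def pvShrink5 (n : Int) : Int :=
  if _h : n ≥ 100000 then pvShrink5 (PySem.Int.floordiv n 10) else n
termination_by n.natAbs
decreasing_by
  have : PySem.Int.floordiv n 10 = n / 10 := PySem.Int.floordiv_eq_ediv_of_pos (by norm_num)
  rw [this]
  omega

-- f"{n:>05}" / f"{n:05}" for the nonnegative n reached here = str(n).zfill(5)
def pvPad5 (n : Int) : String := PySem.Str.zfill (PySem.Int.toStr n) 5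

-- ===== PORT A =====
-- A's loop body over the state (ans, prefix, suffix, trailing, flag)
def pvStepA (st : Int × Int × Int × Int × Bool) (x : Int) : Int × Int × Int × Int × Bool :=
  match st with
  | (ans, pfx, sfx, trailing, flag) =>
    let (ans, flag) :=
      if !flag then
        let a := pvStrip10 (ans * x)
        (a, decide (a ≥ 10000000000))
      else (ans, flag)
    let pfx := pvShrink12 (pfx * x)
    let (sfx, trailing) := pvStripCount (sfx * x) trailing
    let sfx := if sfx ≥ 10000000000 then PySem.Int.mod sfx 10000000000 else sfx
    (ans, pfx, sfx, trailing, flag)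

def abbreviateProduct (left : Int) (right : Int) : String :=
  match (PySem.List.pyRange left (right + 1) 1).foldl pvStepA (1, 1, 1, 0, false) with
  | (ans, pfx, sfx, trailing, flag) =>
    let pfx := pvShrink5 pfx
    let sfx := PySem.Int.mod sfx 100000
    if flag then
      PySem.Int.toStr pfx ++ "..." ++ pvPad5 sfx ++ "e" ++ PySem.Int.toStr trailing
    else
      PySem.Int.toStr ans ++ "e" ++ PySem.Int.toStr trailing

-- ===== PORT B =====
-- `while x % 2 == 0: x //= 2; c += 1`  (x ≠ 0 guard = totality only, as above)
def pvPull2 (x c : Int) : Int × Int :=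
  if h : x ≠ 0 ∧ PySem.Int.mod x 2 = 0 then pvPull2 (PySem.Int.floordiv x 2) (c + 1) else (x, c)
termination_by x.natAbs
decreasing_by
  have hdvd : (2 : Int) ∣ x := (PySem.Int.mod_eq_zero_iff_dvd x 2).1 h.2
  have : PySem.Int.floordiv x 2 = x / 2 := PySem.Int.floordiv_eq_ediv_of_pos (by norm_num)
  rw [this]
  rcases hdvd with ⟨k, hk⟩
  subst hk
  simp only [Int.mul_ediv_cancel_left _ (by norm_num : (2:Int) ≠ 0)]
  have hk0 : k ≠ 0 := by rintro rfl; simp at h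
  omega

-- `while x % 5 == 0: x //= 5; c += 1`
def pvPull5 (x c : Int) : Int × Int :=
  if h : x ≠ 0 ∧ PySem.Int.mod x 5 = 0 then pvPull5 (PySem.Int.floordiv x 5) (c + 1) else (x, c)
termination_by x.natAbs
decreasing_by
  have hdvd : (5 : Int) ∣ x := (PySem.Int.mod_eq_zero_iff_dvd x 5).1 h.2
  have : PySem.Int.floordiv x 5 = x / 5 := PySem.Int.floordiv_eq_ediv_of_pos (by norm_num)
  rw [this]
  rcases hdvd with ⟨k, hk⟩
  subst hk
  simp only [Int.mul_ediv_cancel_left _ (by norm_num : (5:Int) ≠ 0)]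
  have hk0 : k ≠ 0 := by rintro rfl; simp at h
  omega

-- B's first loop: factored significant part (q, c2, c5), break on 10-digit overflow.
-- `2 ** (c2 - m)` has a nonnegative exponent in Python (m = min), so `.toNat` is exact.
def pvPassB (q c2 c5 : Int) : List Int → Int × Int × Int × Bool
  | [] => (q, c2, c5, false)
  | x :: xs =>
    let p2 := pvPull2 x c2
    let p5 := pvPull5 p2.1 c5
    let q' := q * p5.1
    let m := min p2.2 p5.2
    if q' * 2 ^ (p2.2 - m).toNat * 5 ^ (p5.2 - m).toNat ≥ 10000000000 then (q', p2.2, p5.2, true)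
    else pvPassB q' p2.2 p5.2 xs

-- B's second loop (abbreviated case only): prefix window, capped stripped suffix
def pvStepB (st : Int × Int × Int) (x : Int) : Int × Int × Int :=
  match st with
  | (pfx, sfx, t) =>
    let pfx := pvShrink12 (pfx * x)
    let r := pvStripCount (sfx * x) t
    (pfx, if r.1 ≥ 10000000000 then PySem.Int.mod r.1 10000000000 else r.1, r.2)

def abbreviateProduct_alt (left : Int) (right : Int) : String :=
  let xs := PySem.List.pyRange left (right + 1) 1
  match pvPassB 1 0 0 xs with
  | (q, c2, c5, big) =>
    if !big then
      let m := min c2 c5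
      PySem.Int.toStr (q * 2 ^ (c2 - m).toNat * 5 ^ (c5 - m).toNat) ++ "e" ++ PySem.Int.toStr m
    else
      match xs.foldl pvStepB (1, 1, 0) with
      | (pfx, sfx, t) =>
        PySem.Int.toStr (pvShrink5 pfx) ++ "..." ++ pvPad5 (PySem.Int.mod sfx 100000) ++ "e" ++ PySem.Int.toStr t

-- ===== PRECONDITION & SPEC =====
-- Pre_ excludes exactly the ranges containing 0 (left ≤ 0 ≤ right): there A's
-- `while ans % 10 == 0` loop never terminates, so A returns on no such input.
def Pre_abbreviateProduct (left : Int) (right : Int) : Prop := 0 < left ∨ right < 0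
instance (left : Int) (right : Int) : Decidable (Pre_abbreviateProduct left right) := by unfold Pre_abbreviateProduct; infer_instance
def pvWitness_abbreviateProduct : Int × Int := (3, 5)

def Spec_abbreviateProduct (left : Int) (right : Int) (out : String) : Prop := out = abbreviateProduct_alt left right
instance (left : Int) (right : Int) (out : String) : Decidable (Spec_abbreviateProduct left right out) := by unfold Spec_abbreviateProduct; infer_instance

-- ===== CLAIM (what is proved, stated in full; the proofs are below) =====
def Claim_equal_abbreviateProduct : Prop := ∀ (left : Int) (right : Int), Dom_abbreviateProduct left right → Pre_abbreviateProduct left right → Spec_abbreviateProduct left right (abbreviateProduct left right)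

-- ===== LEMMAS AND PROOFS =====

-- proof-side decompositions of A's interleaved loop
def pvPass1 (ans : Int) : List Int → Int × Bool
  | [] => (ans, false)
  | x :: xs =>
    let a := pvStrip10 (ans * x)
    if a ≥ 10000000000 then (a, true) else pvPass1 a xs

def pvStepS (p : Int × Int) (x : Int) : Int × Int :=
  let r := pvStripCount (p.1 * x) p.2
  if r.1 ≥ 10000000000 then (PySem.Int.mod r.1 10000000000, r.2) else r

def pvStepP (p : Int) (x : Int) : Int := pvShrink12 (p * x)

-- the closed-form reconstruction of the zero-stripped product from B's factored state
def pvRecon (q c2 c5 : Int) : Int :=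
  q * 2 ^ (c2 - min c2 c5).toNat * 5 ^ (c5 - min c2 c5).toNat

-- once the flag is set, A's loop leaves ans and flag unchanged
theorem foldl_stepA_true (xs : List Int) : ∀ (ans pfx sfx t : Int),
    xs.foldl pvStepA (ans, pfx, sfx, t, true) =
      (ans, xs.foldl pvStepP pfx, (xs.foldl pvStepS (sfx, t)).1, (xs.foldl pvStepS (sfx, t)).2, true) := by
  induction xs with
  | nil => intro ans pfx sfx t; simp [List.foldl]
  | cons x xs ih =>
    intro ans pfx sfx t
    simp only [List.foldl, pvStepA, pvStepP, pvStepS, Bool.not_true, Bool.false_eq_true, if_false]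
    rw [ih]
    split_ifs <;> simp

-- A's interleaved fold from an unset flag splits into the ans pass and the prefix/suffix folds
theorem foldl_stepA_false (xs : List Int) : ∀ (ans pfx sfx t : Int),
    xs.foldl pvStepA (ans, pfx, sfx, t, false) =
      ((pvPass1 ans xs).1, xs.foldl pvStepP pfx,
       (xs.foldl pvStepS (sfx, t)).1, (xs.foldl pvStepS (sfx, t)).2, (pvPass1 ans xs).2) := by
  induction xs with
  | nil => intro ans pfx sfx t; simp [List.foldl, pvPass1]
  | cons x xs ih =>
    intro ans pfx sfx t
    simp only [List.foldl, pvPass1, pvStepA, pvStepP, pvStepS, Bool.not_false, if_true]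
    by_cases h : pvStrip10 (ans * x) ≥ 10000000000
    · simp only [h, decide_true]
      rw [foldl_stepA_true]
      split_ifs <;> simp
    · simp only [h, decide_false]
      rw [ih]
      split_ifs <;> simp_all

-- B's fused second loop is A's prefix and suffix folds, componentwise
theorem foldl_stepB_split (xs : List Int) : ∀ (p s t : Int),
    xs.foldl pvStepB (p, s, t) =
      (xs.foldl pvStepP p, (xs.foldl pvStepS (s, t)).1, (xs.foldl pvStepS (s, t)).2) := by
  induction xs with
  | nil => intro p s t; simp [List.foldl]
  | cons x xs ih =>
    intro p s t
    simp only [List.foldl, pvStepB, pvStepP, pvStepS]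
    rw [ih]
    split_ifs <;> simp


theorem no_strip (w : Int) (h10 : ¬(10:Int) ∣ w) (t : Int) :
    pvStripCount w t = (w, t) := by
  rw [pvStripCount, dif_neg]
  intro hcon
  exact h10 ((PySem.Int.mod_eq_zero_iff_dvd w 10).1 hcon.2)

theorem not_ten_dvd (w : Int) (hw2 : ¬(2:Int) ∣ w) (hw5 : ¬(5:Int) ∣ w) (A B : ℕ)
    (h : A = 0 ∨ B = 0) : ¬ (10:Int) ∣ w * 2 ^ A * 5 ^ B := by
  have hp2 : Prime (2:ℤ) := Int.prime_two
  have hp5 : Prime (5:ℤ) := by norm_num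
  intro hd
  rcases h with h | h
  · subst h
    have h2 : (2:Int) ∣ w * 2 ^ 0 * 5 ^ B := dvd_trans (by norm_num) hd
    simp only [pow_zero, mul_one] at h2
    rcases hp2.dvd_mul.mp h2 with h | h
    · exact hw2 h
    · have := hp2.dvd_of_dvd_pow h
      norm_num at this
  · subst h
    have h5 : (5:Int) ∣ w * 2 ^ A * 5 ^ 0 := dvd_trans (by norm_num) hd
    simp only [pow_zero, mul_one] at h5
    rcases hp5.dvd_mul.mp h5 with h | h
    · exact hw5 h
    · have := hp5.dvd_of_dvd_pow h
      norm_num at this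

theorem stripCount_pow (w : Int) (hw0 : w ≠ 0) (hw2 : ¬(2:Int) ∣ w) (hw5 : ¬(5:Int) ∣ w) :
    ∀ (A B : ℕ) (t : Int),
      pvStripCount (w * 2 ^ A * 5 ^ B) t =
        (w * 2 ^ (A - min A B) * 5 ^ (B - min A B), t + (min A B : ℤ)) := by
  intro A
  induction A with
  | zero =>
    intro B t
    rw [no_strip _ (not_ten_dvd w hw2 hw5 0 B (Or.inl rfl)) t]
    simp
  | succ A ih =>
    intro B t
    cases B with
    | zero =>
      rw [no_strip _ (not_ten_dvd w hw2 hw5 (A+1) 0 (Or.inr rfl)) t]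
      simp
      omega
    | succ B =>
      rw [pvStripCount]
      rw [dif_pos ?_]
      · have hdiv : PySem.Int.floordiv (w * 2 ^ (A + 1) * 5 ^ (B + 1)) 10 = w * 2 ^ A * 5 ^ B := by
          rw [PySem.Int.floordiv_eq_ediv_of_pos (by norm_num)]
          have : w * 2 ^ (A + 1) * 5 ^ (B + 1) = (w * 2 ^ A * 5 ^ B) * 10 := by ring
          rw [this, Int.mul_ediv_cancel _ (by norm_num)]
        rw [hdiv, ih B (t+1), Prod.mk.injEq]
        refine ⟨?_, ?_⟩
        · have he : A - min A B = A + 1 - min (A + 1) (B + 1) := by omega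
          have hf : B - min A B = B + 1 - min (A + 1) (B + 1) := by omega
          rw [he, hf]
        · push_cast; omega
      · constructor
        · exact mul_ne_zero (mul_ne_zero hw0 (pow_ne_zero _ (by norm_num))) (pow_ne_zero _ (by norm_num))
        · rw [PySem.Int.mod_eq_zero_iff_dvd]
          exact ⟨w * 2 ^ A * 5 ^ B, by ring⟩
theorem pvStrip10_eq (n : Int) : ∀ t, pvStrip10 n = (pvStripCount n t).1 := by
  induction n using pvStrip10.induct with
  | case1 n h ih =>
    intro t
    rw [pvStrip10, pvStripCount, dif_pos h, dif_pos h]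
    exact ih (t + 1)
  | case2 n h =>
    intro t
    rw [pvStrip10, pvStripCount, dif_neg h, dif_neg h]
theorem pvPull2_spec : ∀ (n : ℕ) (x c : Int), x.natAbs ≤ n → x ≠ 0 →
    ∃ (a : ℕ) (y : Int), pvPull2 x c = (y, c + a) ∧ x = y * 2 ^ a ∧ ¬(2:Int) ∣ y ∧ y ≠ 0 := by
  intro n
  induction n with
  | zero => intro x c h hx; omega
  | succ n ih =>
    intro x c hle hx
    by_cases h2 : (2:Int) ∣ x
    · have hmod : PySem.Int.mod x 2 = 0 := (PySem.Int.mod_eq_zero_iff_dvd x 2).2 h2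
      rcases h2 with ⟨k, hk⟩
      have hk0 : k ≠ 0 := by rintro rfl; simp at hk; exact hx hk
      have hdiv : PySem.Int.floordiv x 2 = k := by
        rw [PySem.Int.floordiv_eq_ediv_of_pos (by norm_num), hk, Int.mul_ediv_cancel_left _ (by norm_num)]
      have hkle : k.natAbs ≤ n := by
        have := Int.natAbs_mul 2 k
        omega
      obtain ⟨a, y, h1, h2', h3, h4⟩ := ih k (c + 1) hkle hk0
      refine ⟨a + 1, y, ?_, ?_, h3, h4⟩
      · rw [pvPull2, dif_pos ⟨hx, hmod⟩, hdiv, h1]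
        congr 1
        push_cast
        ring
      · rw [hk, h2']
        ring
    · have hmod : PySem.Int.mod x 2 ≠ 0 := fun hc => h2 ((PySem.Int.mod_eq_zero_iff_dvd x 2).1 hc)
      refine ⟨0, x, ?_, by ring, h2, hx⟩
      rw [pvPull2, dif_neg (fun hc => hmod hc.2)]
      simp

theorem pvPull5_spec : ∀ (n : ℕ) (x c : Int), x.natAbs ≤ n → x ≠ 0 →
    ∃ (b : ℕ) (y : Int), pvPull5 x c = (y, c + b) ∧ x = y * 5 ^ b ∧ ¬(5:Int) ∣ y ∧ y ≠ 0 := by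
  intro n
  induction n with
  | zero => intro x c h hx; omega
  | succ n ih =>
    intro x c hle hx
    by_cases h5 : (5:Int) ∣ x
    · have hmod : PySem.Int.mod x 5 = 0 := (PySem.Int.mod_eq_zero_iff_dvd x 5).2 h5
      rcases h5 with ⟨k, hk⟩
      have hk0 : k ≠ 0 := by rintro rfl; simp at hk; exact hx hk
      have hdiv : PySem.Int.floordiv x 5 = k := by
        rw [PySem.Int.floordiv_eq_ediv_of_pos (by norm_num), hk, Int.mul_ediv_cancel_left _ (by norm_num)]
      have hkle : k.natAbs ≤ n := by
        have := Int.natAbs_mul 5 k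
        omega
      obtain ⟨b, y, h1, h2', h3, h4⟩ := ih k (c + 1) hkle hk0
      refine ⟨b + 1, y, ?_, ?_, h3, h4⟩
      · rw [pvPull5, dif_pos ⟨hx, hmod⟩, hdiv, h1]
        congr 1
        push_cast
        ring
      · rw [hk, h2']
        ring
    · have hmod : PySem.Int.mod x 5 ≠ 0 := fun hc => h5 ((PySem.Int.mod_eq_zero_iff_dvd x 5).1 hc)
      refine ⟨0, x, ?_, by ring, h5, hx⟩
      rw [pvPull5, dif_neg (fun hc => hmod hc.2)]
      simp
theorem passB_spec : ∀ (xs : List Int), (∀ x ∈ xs, x ≠ 0) →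
    ∀ (q c2 c5 t : Int), q ≠ 0 → ¬(2:Int) ∣ q → ¬(5:Int) ∣ q → 0 ≤ c2 → 0 ≤ c5 →
    pvPass1 (pvRecon q c2 c5) xs =
      (pvRecon (pvPassB q c2 c5 xs).1 (pvPassB q c2 c5 xs).2.1 (pvPassB q c2 c5 xs).2.2.1,
       (pvPassB q c2 c5 xs).2.2.2) ∧
    ((pvPassB q c2 c5 xs).2.2.2 = false →
      xs.foldl pvStepS (pvRecon q c2 c5, t) =
        (pvRecon (pvPassB q c2 c5 xs).1 (pvPassB q c2 c5 xs).2.1 (pvPassB q c2 c5 xs).2.2.1,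
         t + (min (pvPassB q c2 c5 xs).2.1 (pvPassB q c2 c5 xs).2.2.1 - min c2 c5))) := by
  intro xs
  induction xs with
  | nil =>
    intro _ q c2 c5 t hq h2 h5 hc2 hc5
    refine ⟨rfl, fun _ => ?_⟩
    show (pvRecon q c2 c5, t) = (pvRecon q c2 c5, t + (min c2 c5 - min c2 c5))
    congr 1
    omega
  | cons x xs ih =>
    intro hnz q c2 c5 t hq h2 h5 hc2 hc5
    have hp2' : Prime (2:ℤ) := Int.prime_two
    have hp5' : Prime (5:ℤ) := by norm_num
    have hx : x ≠ 0 := hnz x (List.mem_cons_self)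
    obtain ⟨a, y, hp2, hxy, hy2, hy0⟩ := pvPull2_spec x.natAbs x c2 le_rfl hx
    obtain ⟨b, u, hp5, hyu, hu5, hu0⟩ := pvPull5_spec y.natAbs y c5 le_rfl hy0
    have hu2 : ¬(2:Int) ∣ u := by
      intro hd
      exact hy2 (hyu ▸ Dvd.dvd.mul_right hd _)
    have hw0 : q * u ≠ 0 := mul_ne_zero hq hu0
    have hw2 : ¬(2:Int) ∣ q * u := by
      intro hd
      rcases hp2'.dvd_mul.mp hd with h | h
      · exact h2 h
      · exact hu2 h
    have hw5 : ¬(5:Int) ∣ q * u := by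
      intro hd
      rcases hp5'.dvd_mul.mp hd with h | h
      · exact h5 h
      · exact hu5 h
    have hfact : pvRecon q c2 c5 * x =
        q * u * 2 ^ ((c2 - min c2 c5).toNat + a) * 5 ^ ((c5 - min c2 c5).toNat + b) := by
      simp only [pvRecon, hxy, hyu, pow_add]
      ring
    have hstrip := stripCount_pow (q * u) hw0 hw2 hw5
      ((c2 - min c2 c5).toNat + a) ((c5 - min c2 c5).toNat + b)
    have hreconEq : q * u *
          2 ^ ((c2 - min c2 c5).toNat + a - min ((c2 - min c2 c5).toNat + a) ((c5 - min c2 c5).toNat + b)) *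
          5 ^ ((c5 - min c2 c5).toNat + b - min ((c2 - min c2 c5).toNat + a) ((c5 - min c2 c5).toNat + b)) =
        pvRecon (q * u) (c2 + a) (c5 + b) := by
      simp only [pvRecon]
      have e1 : (c2 - min c2 c5).toNat + a - min ((c2 - min c2 c5).toNat + a) ((c5 - min c2 c5).toNat + b)
          = ((c2 + a) - min (c2 + a) (c5 + b)).toNat := by omega
      have e2 : (c5 - min c2 c5).toNat + b - min ((c2 - min c2 c5).toNat + a) ((c5 - min c2 c5).toNat + b)
          = ((c5 + b) - min (c2 + a) (c5 + b)).toNat := by omega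
      rw [e1, e2]
    have hstrip10 : pvStrip10 (pvRecon q c2 c5 * x) = pvRecon (q * u) (c2 + a) (c5 + b) := by
      rw [hfact, pvStrip10_eq _ 0, hstrip 0, hreconEq]
    have hstripC : ∀ t', pvStripCount (pvRecon q c2 c5 * x) t' =
        (pvRecon (q * u) (c2 + a) (c5 + b), t' + (min (c2 + a) (c5 + b) - min c2 c5)) := by
      intro t'
      rw [hfact, hstrip t', hreconEq]
      refine Prod.ext rfl ?_
      simp only
      omega
    have hBdef : pvPassB q c2 c5 (x :: xs) =
        (if pvRecon (q * u) (c2 + a) (c5 + b) ≥ 10000000000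
         then (q * u, c2 + a, c5 + b, true)
         else pvPassB (q * u) (c2 + a) (c5 + b) xs) := by
      simp only [pvPassB, hp2, hp5, pvRecon]
      rfl
    have h1def : pvPass1 (pvRecon q c2 c5) (x :: xs) =
        (if pvRecon (q * u) (c2 + a) (c5 + b) ≥ 10000000000
         then (pvRecon (q * u) (c2 + a) (c5 + b), true)
         else pvPass1 (pvRecon (q * u) (c2 + a) (c5 + b)) xs) := by
      simp only [pvPass1, hstrip10]
    by_cases hbig : pvRecon (q * u) (c2 + a) (c5 + b) ≥ 10000000000
    · rw [hBdef, h1def, if_pos hbig, if_pos hbig]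
      exact ⟨rfl, by intro hfl; simp at hfl⟩
    · rw [hBdef, h1def, if_neg hbig, if_neg hbig]
      have htail : ∀ x' ∈ xs, x' ≠ 0 := fun x' hx' => hnz x' (List.mem_cons_of_mem _ hx')
      obtain ⟨ihA, ihS⟩ := ih htail (q * u) (c2 + a) (c5 + b)
        (t + (min (c2 + a) (c5 + b) - min c2 c5)) hw0 hw2 hw5 (by omega) (by omega)
      refine ⟨ihA, fun hfl => ?_⟩
      have hstep : pvStepS (pvRecon q c2 c5, t) x =
          (pvRecon (q * u) (c2 + a) (c5 + b), t + (min (c2 + a) (c5 + b) - min c2 c5)) := by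
        simp only [pvStepS, hstripC t]
        rw [if_neg (by omega)]
      rw [List.foldl_cons, hstep, ihS hfl]
      refine Prod.ext rfl ?_
      simp only
      ring

-- ===== VERDICT (by name: the statement is the Claim_ definition above) =====
theorem abbreviateProduct_spec : Claim_equal_abbreviateProduct := by
  intro left right _ hpre
  unfold Spec_abbreviateProduct abbreviateProduct abbreviateProduct_alt
  have hnz : ∀ x ∈ PySem.List.pyRange left (right + 1) 1, x ≠ 0 := by
    intro x hx
    rw [PySem.List.mem_pyRange_one] at hx
    rcases hpre with h | h <;> omega
  obtain ⟨hA, hS⟩ := passB_spec (PySem.List.pyRange left (right + 1) 1) hnz 1 0 0 0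
    one_ne_zero (by norm_num) (by norm_num) le_rfl le_rfl
  have h1 : pvRecon 1 0 0 = (1:Int) := by norm_num [pvRecon]
  rw [h1] at hA hS
  rcases hB : pvPassB 1 0 0 (PySem.List.pyRange left (right + 1) 1) with ⟨q, c2, c5, flag⟩
  rw [hB] at hA hS
  simp only at hA hS
  rw [foldl_stepA_false, hA]
  simp only [hB]
  cases flag with
  | true =>
    simp only [foldl_stepB_split]
    norm_num
  | false =>
    rw [hS rfl]
    norm_num [pvRecon]
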